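-- pv_equiv track=rewrite | github.com/svjack/DeepPavlov-Chinese-KBQA | ner_model.py | token_l_to_nest_l
-- ===== SOURCE A (Python) =====
-- def token_l_to_nest_l(token_l, prefix = "##"):
--     req = []
--     #req.append([])
--     #### token_l must startswith [CLS]
--     assert token_l[0] == "[CLS]"
--     for ele in token_l:
--         if not ele.startswith(prefix):
--             req.append([ele])
--         else:
--             req[-1].append(ele)
--     return req
-- ===== SOURCE B (Python) =====
-- def token_l_to_nest_l(token_l, prefix="##"):
--     assert token_l[0] == "[CLS]"
--     return _group(token_l, prefix)
--
--
-- def _group(toks, prefix):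
--     # recursive descent: each call peels one head token plus its run of subwords
--     if not toks:
--         return []
--     sub = []
--     rest = toks[1:]
--     while rest and rest[0].startswith(prefix):
--         sub.append(rest[0])
--         rest = rest[1:]
--     return [[toks[0]] + sub] + _group(rest, prefix)
-- ===== Notes on version B (the rewrite author's own statement) =====
-- stated objective: alternative
-- what changed: A makes one linear pass appending each subword onto the mutable last group of a growing result; B is a recursive descent that peels one head token plus its run of prefix-subwords per call and never revisits the output.
import Mathlib
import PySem

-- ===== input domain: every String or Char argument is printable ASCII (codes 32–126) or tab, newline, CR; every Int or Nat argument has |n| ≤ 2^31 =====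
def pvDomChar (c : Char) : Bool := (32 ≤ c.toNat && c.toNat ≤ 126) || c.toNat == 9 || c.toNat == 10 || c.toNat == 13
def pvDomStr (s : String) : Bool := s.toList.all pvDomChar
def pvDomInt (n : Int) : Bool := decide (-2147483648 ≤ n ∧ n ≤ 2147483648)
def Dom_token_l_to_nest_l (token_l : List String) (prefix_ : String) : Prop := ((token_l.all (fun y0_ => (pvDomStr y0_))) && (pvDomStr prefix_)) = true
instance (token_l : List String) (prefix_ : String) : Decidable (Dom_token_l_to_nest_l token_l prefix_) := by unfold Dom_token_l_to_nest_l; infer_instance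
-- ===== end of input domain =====

-- B replaces A's append-to-mutable-last-group pass by a recursive descent over head+subword runs; equal return values on Pre_ (no mutation is observable).

-- ===== PORT A =====
-- A's for-loop as a foldl over the same growing result list; req[-1].append is dropLast + rebuilt last group.
def token_l_to_nest_l (token_l : List String) (prefix_ : String) : List (List String) :=
  token_l.foldl (fun req ele =>
    if ¬ PySem.Str.startswith ele prefix_ then req ++ [[ele]]
    else req.dropLast ++ [(req.getLast?.getD []) ++ [ele]]) []

-- ===== PORT B =====
-- the while-loop of _group: collects the leading run of prefix-subwords of rest into sub
def pvTakeSubs (prefix_ : String) (sub : List String) : List String → List String × List String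
  | [] => (sub, [])
  | r :: rs =>
    if PySem.Str.startswith r prefix_ then pvTakeSubs prefix_ (sub ++ [r]) rs
    else (sub, r :: rs)

lemma pvTakeSubs_snd_length (prefix_ : String) :
    ∀ rest sub, (pvTakeSubs prefix_ sub rest).2.length ≤ rest.length := by
  intro rest
  induction rest with
  | nil => intro sub; simp [pvTakeSubs]
  | cons r rs ih =>
    intro sub
    simp only [pvTakeSubs]
    split
    · exact Nat.le_succ_of_le (ih _)
    · simp

-- B's recursive helper _group
def pvGroup (prefix_ : String) : List String → List (List String)
  | [] => []
  | h :: rest =>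
    let p := pvTakeSubs prefix_ [] rest
    ([h] ++ p.1) :: pvGroup prefix_ p.2
termination_by l => l.length
decreasing_by exact Nat.lt_succ_of_le (pvTakeSubs_snd_length _ _ _)

def token_l_to_nest_l_alt (token_l : List String) (prefix_ : String) : List (List String) :=
  pvGroup prefix_ token_l

-- ===== PRECONDITION & SPEC =====
-- Pre_ excludes exactly the inputs on which A raises: the empty list (IndexError), a first
-- token ≠ "[CLS]" (AssertionError), and a prefix that "[CLS]" itself starts with, where
-- A's req[-1] on the empty result raises IndexError.
def Pre_token_l_to_nest_l (token_l : List String) (prefix_ : String) : Prop :=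
  token_l.head? = some "[CLS]" ∧ PySem.Str.startswith "[CLS]" prefix_ = false
instance (token_l : List String) (prefix_ : String) : Decidable (Pre_token_l_to_nest_l token_l prefix_) := by unfold Pre_token_l_to_nest_l; infer_instance
def pvWitness_token_l_to_nest_l : List String × String := (["[CLS]", "word", "##sub", "x"], "##")

def Spec_token_l_to_nest_l (token_l : List String) (prefix_ : String) (out : List (List String)) : Prop := out = token_l_to_nest_l_alt token_l prefix_
instance (token_l : List String) (prefix_ : String) (out : List (List String)) : Decidable (Spec_token_l_to_nest_l token_l prefix_ out) := by unfold Spec_token_l_to_nest_l; infer_instance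

-- ===== CLAIM (what is proved, stated in full; the proofs are below) =====
def Claim_equal_token_l_to_nest_l : Prop := ∀ (token_l : List String) (prefix_ : String), Dom_token_l_to_nest_l token_l prefix_ → Pre_token_l_to_nest_l token_l prefix_ → Spec_token_l_to_nest_l token_l prefix_ (token_l_to_nest_l token_l prefix_)

-- ===== LEMMAS AND PROOFS =====

-- characterisation of A's fold once the result list is nonempty: only the open last group g matters
def pvCore (prefix_ : String) (g : List String) : List String → List (List String)
  | [] => [g]
  | e :: t =>
    if ¬ PySem.Str.startswith e prefix_ then g :: pvCore prefix_ [e] t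
    else pvCore prefix_ (g ++ [e]) t

lemma pvFold_eq_core (prefix_ : String) (l : List String) :
    ∀ (acc : List (List String)) (g : List String),
      l.foldl (fun req ele =>
        if ¬ PySem.Str.startswith ele prefix_ then req ++ [[ele]]
        else req.dropLast ++ [(req.getLast?.getD []) ++ [ele]]) (acc ++ [g])
      = acc ++ pvCore prefix_ g l := by
  induction l with
  | nil => intro acc g; simp [pvCore]
  | cons e t ih =>
    intro acc g
    by_cases h : PySem.Chars.startswith e.toList prefix_.toList = true
    · have hstep : (if ¬ PySem.Str.startswith e prefix_ then (acc ++ [g]) ++ [[e]]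
          else (acc ++ [g]).dropLast ++ [((acc ++ [g]).getLast?.getD []) ++ [e]])
          = acc ++ [g ++ [e]] := by
        simp [h]
      have hcore : pvCore prefix_ g (e :: t) = pvCore prefix_ (g ++ [e]) t := by
        simp [pvCore, h]
      rw [List.foldl_cons, hstep, hcore, ih acc (g ++ [e])]
    · have hstep : (if ¬ PySem.Str.startswith e prefix_ then (acc ++ [g]) ++ [[e]]
          else (acc ++ [g]).dropLast ++ [((acc ++ [g]).getLast?.getD []) ++ [e]])
          = (acc ++ [g]) ++ [[e]] := by
        simp [h]
      have hcore : pvCore prefix_ g (e :: t) = g :: pvCore prefix_ [e] t := by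
        simp [pvCore, h]
      rw [List.foldl_cons, hstep, hcore, ih (acc ++ [g]) [e]]
      simp

lemma pvTakeSubs_acc (prefix_ : String) :
    ∀ (rest sub : List String),
      pvTakeSubs prefix_ sub rest
        = (sub ++ (pvTakeSubs prefix_ [] rest).1, (pvTakeSubs prefix_ [] rest).2) := by
  intro rest
  induction rest with
  | nil => intro sub; simp [pvTakeSubs]
  | cons r rs ih =>
    intro sub
    by_cases h : PySem.Chars.startswith r.toList prefix_.toList = true
    · have h1 : ∀ s : List String, pvTakeSubs prefix_ s (r :: rs) = pvTakeSubs prefix_ (s ++ [r]) rs := by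
        intro s; simp [pvTakeSubs, h]
      rw [h1 sub, h1 [], List.nil_append, ih (sub ++ [r]), ih [r]]
      simp
    · simp [pvTakeSubs, h]

lemma pvCore_eq_group (prefix_ : String) :
    ∀ (l g : List String),
      pvCore prefix_ g l
        = (g ++ (pvTakeSubs prefix_ [] l).1) :: pvGroup prefix_ (pvTakeSubs prefix_ [] l).2 := by
  intro l
  induction l with
  | nil => intro g; simp [pvCore, pvTakeSubs, pvGroup]
  | cons e t ih =>
    intro g
    by_cases h : PySem.Chars.startswith e.toList prefix_.toList = true
    · have hcore : pvCore prefix_ g (e :: t) = pvCore prefix_ (g ++ [e]) t := by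
        simp [pvCore, h]
      have hts : pvTakeSubs prefix_ [] (e :: t) = pvTakeSubs prefix_ [e] t := by
        simp [pvTakeSubs, h]
      rw [hcore, ih (g ++ [e]), hts, pvTakeSubs_acc prefix_ t [e]]
      simp [List.append_assoc]
    · have hcore : pvCore prefix_ g (e :: t) = g :: pvCore prefix_ [e] t := by
        simp [pvCore, h]
      have hts : pvTakeSubs prefix_ [] (e :: t) = ([], e :: t) := by
        simp [pvTakeSubs, h]
      rw [hcore, ih [e], hts]
      simp [pvGroup]

-- ===== VERDICT (by name: the statement is the Claim_ definition above) =====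
theorem token_l_to_nest_l_spec : Claim_equal_token_l_to_nest_l := by
  intro token_l prefix_ _ hpre
  obtain ⟨hhead, hcls⟩ := hpre
  have hcls' : PySem.Chars.startswith "[CLS]".toList prefix_.toList = false := by
    simpa using hcls
  match token_l, hhead with
  | h :: t, hhead =>
    have hh : h = "[CLS]" := by simpa using hhead
    subst hh
    show token_l_to_nest_l ("[CLS]" :: t) prefix_ = token_l_to_nest_l_alt ("[CLS]" :: t) prefix_
    unfold token_l_to_nest_l
    rw [List.foldl_cons]
    have hstep0 : (if ¬ PySem.Str.startswith "[CLS]" prefix_ then ([] : List (List String)) ++ [["[CLS]"]]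
        else ([] : List (List String)).dropLast ++ [(([] : List (List String)).getLast?.getD []) ++ ["[CLS]"]])
        = [] ++ [["[CLS]"]] := by simp
    rw [hstep0, pvFold_eq_core prefix_ t [] ["[CLS]"], pvCore_eq_group]
    simp [token_l_to_nest_l_alt, pvGroup]
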